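-- pv_equiv track=rewrite | github.com/TheScarletBadger/Foo.Bar-Challenge | DoomsDayFuelFinal.py | flipflop
-- ===== SOURCE A (Python) =====
-- def flipflop(matrix):
--     terminal = []
--     transient = []
--     terminalkey = []
--     transientkey = []
--     for i in range(0,len(matrix)):
--         if sum(matrix[i])==0:
--             terminal.append(matrix[i])
--             terminalkey.append(i+1)
--         else:
--             transient.append(matrix[i])
--             transientkey.append(i+1)
--     matrix = transient + terminal
--     key = transientkey + terminalkey
--     colkey = [x for _, x in sorted(zip(key, list(range(0,len(matrix)))))]
--     for i in range(0,len(matrix)):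
--         matrix[i] = [x for _, x in sorted(zip(colkey, matrix[i]))]
--     return matrix
-- ===== SOURCE B (Python) =====
-- def flipflop(matrix):
--     nonzero = [sum(row) != 0 for row in matrix]
--     def reorder(row):
--         return ([v for k, v in zip(nonzero, row) if k]
--               + [v for k, v in zip(nonzero, row) if not k])
--     return [reorder(row) for row, k in zip(matrix, nonzero) if k] \
--          + [reorder(row) for row, k in zip(matrix, nonzero) if not k]
-- ===== Notes on version B (the rewrite author's own statement) =====
-- stated objective: alternative
-- what changed: B partitions rows and, within each row, columns by the per-row zero-sum flags using zip-based filtering and does no sorting at all, instead of A's building integer key lists and sorting zipped (key, value) pairs once for the column order and again for every row.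
import Mathlib
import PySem

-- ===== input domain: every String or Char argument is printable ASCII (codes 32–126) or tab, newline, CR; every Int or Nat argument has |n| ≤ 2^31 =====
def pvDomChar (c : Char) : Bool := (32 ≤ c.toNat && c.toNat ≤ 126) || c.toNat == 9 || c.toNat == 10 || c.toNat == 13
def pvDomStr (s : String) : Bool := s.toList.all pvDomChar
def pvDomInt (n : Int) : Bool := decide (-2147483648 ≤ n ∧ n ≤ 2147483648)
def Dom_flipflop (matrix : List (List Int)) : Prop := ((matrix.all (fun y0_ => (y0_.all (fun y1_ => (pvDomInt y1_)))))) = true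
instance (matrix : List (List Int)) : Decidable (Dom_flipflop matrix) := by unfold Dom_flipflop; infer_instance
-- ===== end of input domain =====

-- B partitions rows and columns by the zero-sum flags with zip-based filtering, no sorting.
-- Return value only: A rebinds only its local 'matrix' name, which the caller cannot observe.

-- ===== PORT A =====
def flipflop (matrix : List (List Int)) : List (List Int) :=
  -- four accumulators: (terminal, terminalkey, transient, transientkey)
  let st := (PySem.List.pyRange 0 (matrix.length : Int)).foldl
      (fun (s : List (List Int) × List Int × List (List Int) × List Int) i =>
        if (PySem.List.pyGetD matrix i []).sum = 0 then
          (s.1 ++ [PySem.List.pyGetD matrix i []], s.2.1 ++ [i + 1], s.2.2.1, s.2.2.2)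
        else
          (s.1, s.2.1, s.2.2.1 ++ [PySem.List.pyGetD matrix i []], s.2.2.2 ++ [i + 1]))
      ([], [], [], [])
  let matrix2 := st.2.2.1 ++ st.1
  let key := st.2.2.2 ++ st.2.1
  -- colkey = [x for _, x in sorted(zip(key, list(range(0, len(matrix)))))]  (tuple comparison)
  let colkey := (PySem.List.sorted2 (key.zip (PySem.List.pyRange 0 (matrix2.length : Int)))
      Prod.fst Prod.snd).map Prod.snd
  matrix2.map (fun row =>
    (PySem.List.sorted2 (colkey.zip row) Prod.fst Prod.snd).map Prod.snd)

-- ===== PORT B =====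
def flipflop_alt (matrix : List (List Int)) : List (List Int) :=
  let nonzero := matrix.map (fun row => decide (row.sum ≠ 0))
  let reorder := fun (row : List Int) =>
    ((nonzero.zip row).filter (fun kv => kv.1)).map Prod.snd
    ++ ((nonzero.zip row).filter (fun kv => !kv.1)).map Prod.snd
  ((matrix.zip nonzero).filter (fun rk => rk.2)).map (fun rk => reorder rk.1)
  ++ ((matrix.zip nonzero).filter (fun rk => !rk.2)).map (fun rk => reorder rk.1)

-- ===== PRECONDITION & SPEC =====
def Spec_flipflop (matrix : List (List Int)) (out : List (List Int)) : Prop := out = flipflop_alt matrix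
instance (matrix : List (List Int)) (out : List (List Int)) : Decidable (Spec_flipflop matrix out) := by unfold Spec_flipflop; infer_instance

-- ===== CLAIM (what is proved, stated in full; the proofs are below) =====
def Claim_equal_flipflop : Prop := ∀ (matrix : List (List Int)), Dom_flipflop matrix → Spec_flipflop matrix (flipflop matrix)

-- ===== LEMMAS AND PROOFS =====

-- the row/column permutation both programs realise: non-zero-sum indices, then zero-sum indices
def permOf (matrix : List (List Int)) : List Nat :=
  (List.range matrix.length).filter (fun i => decide ((matrix.getD i []).sum ≠ 0))
  ++ (List.range matrix.length).filter (fun i => decide ((matrix.getD i []).sum = 0))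

-- filter (< m) over range n is range m (m ≤ n)
lemma filter_lt_range (n m : Nat) (h : m ≤ n) :
    (List.range n).filter (fun x => decide (x < m)) = List.range m := by
  rw [show n = m + (n - m) by omega, List.range_add, List.filter_append]
  rw [List.filter_eq_self.mpr (by simp [List.mem_range]), List.filter_eq_nil_iff.mpr (by simp)]
  simp

-- insertBy with pointwise-agreeing comparators
lemma insertBy_congr {α : Type} (b₁ b₂ : α → α → Bool) (x : α) (ys : List α)
    (h : ∀ y ∈ ys, b₁ x y = b₂ x y) :
    PySem.List.insertBy b₁ x ys = PySem.List.insertBy b₂ x ys := by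
  induction ys with
  | nil => rfl
  | cons y t ih =>
    simp only [PySem.List.insertBy]
    rw [h y (by simp)]
    by_cases hb : b₂ x y = true
    · simp [hb]
    · simp only [Bool.not_eq_true] at hb
      simp [hb, ih (fun z hz => h z (by simp [hz]))]

lemma foldl_insertBy_congr {α : Type} (b₁ b₂ : α → α → Bool) (l : List α) (acc : List α)
    (H : ∀ a ∈ l, ∀ y, (y ∈ l ∨ y ∈ acc) → b₁ a y = b₂ a y) :
    l.foldl (fun acc x => PySem.List.insertBy b₁ x acc) acc
      = l.foldl (fun acc x => PySem.List.insertBy b₂ x acc) acc := by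
  induction l generalizing acc with
  | nil => rfl
  | cons x t ih =>
    simp only [List.foldl_cons]
    rw [insertBy_congr b₁ b₂ x acc (fun y hy => H x (by simp) y (Or.inr hy))]
    exact ih _ (fun a ha y hy => H a (by simp [ha]) y (by
      rcases hy with hy | hy
      · exact Or.inl (by simp [hy])
      · rcases (PySem.List.mem_insertBy b₂ x y acc).mp hy with rfl | hy
        · exact Or.inl (by simp)
        · exact Or.inr hy))

-- Python's sorted on (Int × Int) pairs: any strictly fst-increasing rearrangement is the result
lemma sorted2_eq_of_perm_of_pairwise_fst_lt (xs ys : List (Int × Int))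
    (hp : ys.Perm xs) (hlt : ys.Pairwise (fun a b => a.1 < b.1)) :
    PySem.List.sorted2 xs Prod.fst Prod.snd = ys := by
  have hne : ys.Pairwise (fun a b : Int × Int => a.1 ≠ b.1) := hlt.imp (fun h => ne_of_lt h)
  have hinj : ∀ a ∈ xs, ∀ b ∈ xs, a.1 = b.1 → a = b := by
    intro a ha b hb hab
    by_contra hab'
    exact (List.Pairwise.forall (show Symmetric (fun a b : Int × Int => a.1 ≠ b.1) from fun _ _ h => Ne.symm h) hne
      (hp.mem_iff.mpr ha) (hp.mem_iff.mpr hb) hab') hab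
  have h1 : PySem.List.sorted2 xs Prod.fst Prod.snd = PySem.List.sorted xs Prod.fst := by
    simp only [PySem.List.sorted2, PySem.List.sorted, if_neg (Bool.false_ne_true)]
    apply foldl_insertBy_congr
    intro a ha y hy
    have hy' : y ∈ xs := by rcases hy with hy | hy; exact hy; simp at hy
    rcases lt_trichotomy a.1 y.1 with h | h | h
    · simp [h]
    · have : a = y := hinj a ha y hy' h
      subst this
      simp
    · simp [h, not_lt_of_gt h]
  rw [h1]
  exact PySem.List.sorted_eq_of_perm_of_pairwise_lt xs ys Prod.fst hp hlt

-- A's accumulation loop, in closed form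
lemma foldA (matrix : List (List Int)) (l : List Int)
    (t : List (List Int)) (tk : List Int) (r : List (List Int)) (rk : List Int) :
    l.foldl
      (fun (s : List (List Int) × List Int × List (List Int) × List Int) i =>
        if (PySem.List.pyGetD matrix i []).sum = 0 then
          (s.1 ++ [PySem.List.pyGetD matrix i []], s.2.1 ++ [i + 1], s.2.2.1, s.2.2.2)
        else
          (s.1, s.2.1, s.2.2.1 ++ [PySem.List.pyGetD matrix i []], s.2.2.2 ++ [i + 1]))
      (t, tk, r, rk)
    = (t ++ (l.filter (fun i => decide ((PySem.List.pyGetD matrix i []).sum = 0))).map (fun i => PySem.List.pyGetD matrix i []),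
       tk ++ (l.filter (fun i => decide ((PySem.List.pyGetD matrix i []).sum = 0))).map (fun i => i + 1),
       r ++ (l.filter (fun i => !decide ((PySem.List.pyGetD matrix i []).sum = 0))).map (fun i => PySem.List.pyGetD matrix i []),
       rk ++ (l.filter (fun i => !decide ((PySem.List.pyGetD matrix i []).sum = 0))).map (fun i => i + 1)) := by
  induction l generalizing t tk r rk with
  | nil => simp
  | cons x xs ih =>
    simp only [List.foldl_cons, List.filter_cons]
    by_cases h : (PySem.List.pyGetD matrix x []).sum = 0
    · simp [h, ih]
    · simp [h, ih]

-- the colkey computation: sorting (key, position) pairs recovers the inverse permutation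
lemma colkey_eq (perm : List Nat) (n : Nat) (hlen : perm.length = n)
    (hperm : perm.Perm (List.range n)) :
    (PySem.List.sorted2 ((perm.map (fun (i : Nat) => (i : Int) + 1)).zip
        ((List.range n).map (fun (k : Nat) => (k : Int)))) Prod.fst Prod.snd).map Prod.snd
      = (List.range n).map (fun i => (perm.idxOf i : Int)) := by
  have hnodup : perm.Nodup := hperm.nodup_iff.mpr List.nodup_range
  have hzip : (perm.map (fun (i : Nat) => (i : Int) + 1)).zip ((List.range n).map (fun (k : Nat) => (k : Int)))
      = perm.map (fun (i : Nat) => ((i : Int) + 1, (perm.idxOf i : Int))) := by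
    apply List.ext_getElem
    · simp [hlen]
    · intro j h1 h2
      have hj : j < perm.length := by simpa using h2
      simp only [List.getElem_zip, List.getElem_map, List.getElem_range]
      refine Prod.ext rfl ?_
      simp [hnodup.idxOf_getElem j hj]
  rw [hzip, sorted2_eq_of_perm_of_pairwise_fst_lt _
      ((List.range n).map (fun (i : Nat) => ((i : Int) + 1, (perm.idxOf i : Int))))
      (hperm.map _).symm
      (List.pairwise_map.mpr (List.pairwise_lt_range.imp (by intro i j h; simp; omega)))]
  simp [List.map_map, Function.comp_def]

-- the per-row step: sorting (colkey, value) pairs is indexing through perm at the row's positions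
lemma row_eq (perm : List Nat) (n : Nat) (_hlen : perm.length = n)
    (hperm : perm.Perm (List.range n)) (r : List Int) :
    (PySem.List.sorted2 ((((List.range n).map (fun i => (perm.idxOf i : Int))).zip r))
        Prod.fst Prod.snd).map Prod.snd
      = (perm.filter (fun q => decide (q < r.length))).map (fun q => r.getD q 0) := by
  have hnodup : perm.Nodup := hperm.nodup_iff.mpr List.nodup_range
  have hzip : ((List.range n).map (fun i => (perm.idxOf i : Int))).zip r
      = (List.range (min n r.length)).map (fun c => ((perm.idxOf c : Int), r.getD c 0)) := by
    apply List.ext_getElem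
    · simp
    · intro j h1 h2
      have hjm : j < min n r.length := by simpa using h2
      have hjL : j < r.length := lt_of_lt_of_le hjm (min_le_right _ _)
      simp only [List.getElem_zip, List.getElem_map, List.getElem_range]
      refine Prod.ext rfl ?_
      simp [List.getElem?_eq_getElem hjL]
  have hpermfilter : (perm.filter (fun q => decide (q < r.length))).Perm (List.range (min n r.length)) := by
    have h1 := List.Perm.filter (fun q => decide (q < r.length)) hperm
    have h2 : (List.range n).filter (fun q => decide (q < r.length))
        = (List.range n).filter (fun q => decide (q < min n r.length)) :=
      List.filter_congr (by intro x hx; simp [List.mem_range] at hx; simp; omega)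
    rw [h2, filter_lt_range n (min n r.length) (min_le_left _ _)] at h1
    exact h1
  have hpair : ((perm.filter (fun q => decide (q < r.length))).map
      (fun c => ((perm.idxOf c : Int), r.getD c 0))).Pairwise (fun a b => a.1 < b.1) := by
    apply List.pairwise_map.mpr
    have hp : perm.Pairwise (fun a b => (perm.idxOf a : Int) < (perm.idxOf b : Int)) := by
      rw [List.pairwise_iff_getElem]
      intro i j hi hj hij
      rw [hnodup.idxOf_getElem i hi, hnodup.idxOf_getElem j hj]
      omega
    exact hp.sublist List.filter_sublist
  rw [hzip, sorted2_eq_of_perm_of_pairwise_fst_lt _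
      ((perm.filter (fun q => decide (q < r.length))).map (fun c => ((perm.idxOf c : Int), r.getD c 0)))
      (hpermfilter.map _) hpair]
  simp [List.map_map, Function.comp_def]

-- A, in closed form: rows indexed through permOf, each row filtered through permOf
lemma A_closed (matrix : List (List Int)) :
    flipflop matrix = (permOf matrix).map (fun p =>
      ((permOf matrix).filter (fun q => decide (q < (matrix.getD p []).length))).map
        (fun q => (matrix.getD p []).getD q 0)) := by
  unfold permOf
  simp only [flipflop]
  rw [foldA]
  simp only [PySem.List.pyRange_zero_natCast, List.filter_map, List.map_map, Function.comp_def,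
    PySem.List.pyGetD_natCast, List.nil_append]
  have hnotnot : (fun i : Nat => !decide ((matrix.getD i []).sum = 0))
      = fun i : Nat => decide ((matrix.getD i []).sum ≠ 0) := by
    funext i; simp [decide_not]
  set n := matrix.length with hn
  set perm := (List.range n).filter (fun i => decide ((matrix.getD i []).sum ≠ 0))
      ++ (List.range n).filter (fun i => decide ((matrix.getD i []).sum = 0)) with hpermdef
  have hperm : perm.Perm (List.range n) := by
    rw [hpermdef, ← hnotnot]
    have := List.filter_append_perm (fun i : Nat => !decide ((matrix.getD i []).sum = 0)) (List.range n)
    simpa [Bool.not_not] using this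
  have hlen : perm.length = n := by rw [hperm.length_eq, List.length_range]
  rw [hnotnot]
  rw [← List.map_append, ← List.map_append, ← hpermdef]
  have hmatlen : (perm.map (fun i => matrix.getD i [])).length = n := by simp [hlen]
  rw [hmatlen, colkey_eq perm n hlen hperm]
  rw [List.map_map]
  apply List.map_eq_map_iff.mpr
  intro p _
  simp only [Function.comp_def]
  rw [row_eq perm n hlen hperm (matrix.getD p [])]

-- selecting by a predicate over indices of l equals filtering l
lemma rangeFilterMap {α β : Type} (l : List α) (d : α) (p : α → Bool) (g : α → β) :
    (((List.range l.length).filter (fun i => p (l.getD i d))).map (fun i => g (l.getD i d)))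
      = (l.filter p).map g := by
  induction l with
  | nil => simp
  | cons x xs ih =>
    rw [show (x :: xs).length = xs.length + 1 from rfl, List.range_succ_eq_map, List.filter_cons]
    simp only [List.getD_cons_zero, List.getD_cons_succ, List.filter_map, Function.comp_def]
    by_cases h : p x
    · rw [if_pos h, List.filter_cons_of_pos h]
      simp only [List.map_cons, List.getD_cons_zero, List.map_map, Function.comp_def,
        List.getD_cons_succ]
      rw [ih]
    · rw [if_neg (by simp [h]), List.filter_cons_of_neg (by simp [h])]
      simp only [List.map_map, Function.comp_def, List.getD_cons_succ]
      rw [ih]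

-- zip-with-flags filtering equals index filtering through the flag list
lemma zipFilterEq (flags : List Bool) (r : List Int) (p : Bool → Bool) :
    ((flags.zip r).filter (fun kv => p kv.1)).map Prod.snd
      = ((List.range flags.length).filter
          (fun i => p (flags.getD i false) && decide (i < r.length))).map (fun i => r.getD i 0) := by
  induction flags generalizing r with
  | nil => simp
  | cons f fs ih =>
    cases r with
    | nil => simp
    | cons x xs =>
      rw [show (f :: fs).length = fs.length + 1 from rfl, List.range_succ_eq_map,
        List.zip_cons_cons, List.filter_cons, List.filter_cons]
      simp only [List.getD_cons_zero, List.getD_cons_succ, List.filter_map, Function.comp_def,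
        List.length_cons]
      by_cases h : p f
      · rw [if_pos (by simp [h]), if_pos (by simp [h])]
        simp only [List.map_cons, List.getD_cons_zero, List.map_map, Function.comp_def,
          List.getD_cons_succ]
        rw [ih xs]
        simp
      · rw [if_neg (by simp [h]), if_neg (by simp [h])]
        simp only [List.map_map, Function.comp_def, List.getD_cons_succ]
        rw [ih xs]
        simp

-- B's per-row reorder equals A's filtered-perm indexing, for every row
lemma reorder_eq (matrix : List (List Int)) (r : List Int) :
    (((matrix.map (fun row => decide (row.sum ≠ 0))).zip r).filter (fun kv => kv.1)).map Prod.snd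
    ++ (((matrix.map (fun row => decide (row.sum ≠ 0))).zip r).filter (fun kv => !kv.1)).map Prod.snd
      = ((permOf matrix).filter (fun q => decide (q < r.length))).map (fun q => r.getD q 0) := by
  rw [zipFilterEq _ r (fun b => b), zipFilterEq _ r (fun b => !b)]
  unfold permOf
  rw [List.filter_append, List.map_append]
  have hget : ∀ i ∈ List.range matrix.length,
      (matrix.map (fun row => decide (row.sum ≠ 0))).getD i false
        = decide ((matrix.getD i []).sum ≠ 0) := by
    intro i hi
    simp only [List.mem_range] at hi
    rw [List.getD_eq_getElem _ _ (by simpa using hi), List.getElem_map,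
        List.getD_eq_getElem _ _ hi]
  congr 1
  · rw [List.filter_filter, List.length_map]
    refine congrArg _ (List.filter_congr ?_)
    intro i hi
    simp only [List.mem_range] at hi
    simp [List.getElem?_eq_getElem hi, List.getD, Bool.and_comm, decide_not]
  · rw [List.filter_filter, List.length_map]
    refine congrArg _ (List.filter_congr ?_)
    intro i hi
    simp only [List.mem_range] at hi
    simp [List.getElem?_eq_getElem hi, List.getD, Bool.and_comm, decide_not]

-- B, in the same closed form
lemma B_closed (matrix : List (List Int)) :
    flipflop_alt matrix = (permOf matrix).map (fun p =>
      ((permOf matrix).filter (fun q => decide (q < (matrix.getD p []).length))).map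
        (fun q => (matrix.getD p []).getD q 0)) := by
  simp only [flipflop_alt]
  have hzip : matrix.zip (matrix.map (fun row => decide (row.sum ≠ 0)))
      = matrix.map (fun row => (row, decide (row.sum ≠ 0))) := by
    apply List.ext_getElem
    · simp
    · intro j h1 h2
      simp [List.getElem_zip]
  rw [hzip]
  simp only [List.filter_map, List.map_map, Function.comp_def]
  have hrows : (permOf matrix).map (fun i => matrix.getD i [])
      = matrix.filter (fun row => decide (row.sum ≠ 0))
        ++ matrix.filter (fun row => decide (row.sum = 0)) := by
    unfold permOf
    rw [List.map_append]
    congr 1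
    · simpa using rangeFilterMap matrix [] (fun row => decide (row.sum ≠ 0)) id
    · simpa using rangeFilterMap matrix [] (fun row => decide (row.sum = 0)) id
  have hRHS : (permOf matrix).map (fun p =>
      ((permOf matrix).filter (fun q => decide (q < (matrix.getD p []).length))).map
        (fun q => (matrix.getD p []).getD q 0))
    = (matrix.filter (fun row => decide (row.sum ≠ 0))
        ++ matrix.filter (fun row => decide (row.sum = 0))).map (fun r =>
        ((permOf matrix).filter (fun q => decide (q < r.length))).map (fun q => r.getD q 0)) := by
    rw [← hrows, List.map_map]
    simp only [Function.comp_def]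
  rw [hRHS, List.map_append]
  congr 1
  · apply List.map_eq_map_iff.mpr
    intro r _
    exact (reorder_eq matrix r).symm ▸ rfl
  · have hfe : matrix.filter (fun row => (!decide (row.sum ≠ 0)))
        = matrix.filter (fun row => decide (row.sum = 0)) := by
      refine List.filter_congr ?_
      intro r _; simp [decide_not]
    rw [← hfe]
    apply List.map_eq_map_iff.mpr
    intro r _
    exact (reorder_eq matrix r).symm ▸ rfl

-- ===== VERDICT (by name: the statement is the Claim_ definition above) =====
theorem flipflop_spec : Claim_equal_flipflop := by
  intro matrix _
  unfold Spec_flipflop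
  rw [A_closed, B_closed]
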